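-- pv_equiv track=rewrite | github.com/ribo0715/algorithm_solution | BOJ/12100. 2048 (Easy).py | merge_down
-- ===== SOURCE A (Python) =====
-- def merge_down(board, n):
--     temp = [[] for _ in range(n)]  # merge하는 방향으로 값들을 담을 배열
--
--     for i in range(n):
--         for j in range(n):
--             if board[n - 1 - j][i] != 0:  # 빈칸은 제외
--                 temp[i].append(board[n - 1 - j][i])
--
--     # 연속되는 값이 같은 경우, 값을 합침
--     for i in range(n):
--         for j in range(n):
--             if j > len(temp[i]) - 2:  # 해당 줄을 다 마친 경우
--                 break
--
--             if temp[i][j] == temp[i][j + 1]:  # 연속된 두 값이 같은 경우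
--                 temp[i][j] += temp[i][j + 1]  # 둘을 합친 뒤,
--                 del (temp[i][j + 1])  # 하나는 지워줌
--
--     board = [[0] * n for _ in range(n)]
--
--     for i in range(n):
--         for j in range(len(temp[i])):
--             board[n - 1 - j][i] = temp[i][j]
--
--     return board  # merge 후의 보드판을 반환
-- ===== SOURCE B (Python) =====
-- def merge_down(board, n):
--     out = [[0] * n for _ in range(n)]
--     for i in range(n):
--         # gather column i bottom-up, skipping zeros
--         col = [x for x in reversed([row[i] for row in board[:n]]) if x != 0]
--         # single forward pass pairing merge (no re-merge)
--         merged = []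
--         k = 0
--         while k < len(col):
--             if k + 1 < len(col) and col[k] == col[k + 1]:
--                 merged.append(col[k] * 2)
--                 k += 2
--             else:
--                 merged.append(col[k])
--                 k += 1
--         for j, v in enumerate(merged):
--             out[n - 1 - j][i] = v
--     return out
-- ===== Notes on version B (the rewrite author's own statement) =====
-- stated objective: simpler
-- what changed: Replaces A's three separate global n-by-n passes (gather into temp, in-place del-based merge with break, write-back) by one loop handling each column independently: slice/reverse/filter to gather, a single skip-by-two pairing pass that builds the merged list fresh, and an enumerate write-back.
import Mathlib
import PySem

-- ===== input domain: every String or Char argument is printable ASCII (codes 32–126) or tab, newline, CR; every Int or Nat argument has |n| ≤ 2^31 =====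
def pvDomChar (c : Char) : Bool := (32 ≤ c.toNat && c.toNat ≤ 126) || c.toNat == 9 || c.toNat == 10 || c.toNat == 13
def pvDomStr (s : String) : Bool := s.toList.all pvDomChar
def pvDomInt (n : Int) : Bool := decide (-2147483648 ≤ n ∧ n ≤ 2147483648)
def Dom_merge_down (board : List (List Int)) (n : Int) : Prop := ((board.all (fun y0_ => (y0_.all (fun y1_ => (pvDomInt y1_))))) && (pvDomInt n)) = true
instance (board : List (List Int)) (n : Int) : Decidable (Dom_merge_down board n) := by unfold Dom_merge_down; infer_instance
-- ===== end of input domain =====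

-- B merges each column in one per-column pass (gather bottom-up, pairing merge building a new list, write back); simpler than A's three global passes with in-place del.

-- ===== PORT A =====
-- first pass: temp[i].append(board[n-1-j][i]) for nonzero entries
def mdA_gather (board : List (List Int)) (n i : Int) : List Int :=
  (PySem.List.pyRange 0 n 1).foldl (fun acc j =>
    if PySem.List.pyGetD (PySem.List.pyGetD board (n - 1 - j) []) i 0 ≠ 0 then
      acc ++ [PySem.List.pyGetD (PySem.List.pyGetD board (n - 1 - j) []) i 0]
    else acc) []

-- second pass body: 'for j in range(n): if j > len(t)-2: break; if t[j]==t[j+1]: t[j]+=t[j+1]; del t[j+1]'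
-- (the 'for' with 'break' is the recursion over the remaining range; 'del' is pop?, in range whenever reached)
def mdA_mergeLoop : List Int → List Int → List Int
  | [], t => t
  | j :: rest, t =>
    if j > (t.length : Int) - 2 then t
    else if PySem.List.pyGetD t j 0 = PySem.List.pyGetD t (j + 1) 0 then
      let t1 := PySem.List.pySetD t j (PySem.List.pyGetD t j 0 + PySem.List.pyGetD t (j + 1) 0)
      mdA_mergeLoop rest (((PySem.List.pop? t1 (j + 1)).map Prod.snd).getD t1)
    else mdA_mergeLoop rest t

-- third pass body: 'for j in range(len(temp[i])): board[n-1-j][i] = temp[i][j]'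
def mdA_write (b : List (List Int)) (n i : Int) (ti : List Int) : List (List Int) :=
  (PySem.List.pyRange 0 (PySem.List.len ti) 1).foldl (fun b j =>
    PySem.List.pySetD b (n - 1 - j)
      (PySem.List.pySetD (PySem.List.pyGetD b (n - 1 - j) []) i (PySem.List.pyGetD ti j 0))) b

def merge_down (board : List (List Int)) (n : Int) : List (List Int) :=
  -- temp built by the first double loop (each outer i only appends to temp[i])
  let temp := (PySem.List.pyRange 0 n 1).map (fun i => mdA_gather board n i)
  -- second double loop mutates each temp[i] independently
  let temp2 := temp.map (fun t => mdA_mergeLoop (PySem.List.pyRange 0 n 1) t)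
  -- board = [[0]*n for _ in range(n)], then the write-back double loop
  (PySem.List.pyRange 0 n 1).foldl
    (fun b i => mdA_write b n i (PySem.List.pyGetD temp2 i []))
    (List.replicate n.toNat (List.replicate n.toNat 0))

-- ===== PORT B =====
-- col = [x for x in reversed([row[i] for row in board[:n]]) if x != 0]
def mdB_col (board : List (List Int)) (n i : Int) : List Int :=
  (((PySem.List.slice board none (some n)).map (fun row => PySem.List.pyGetD row i 0)).reverse).filter
    (fun x => x != 0)

-- the while-loop pairing merge: skip two after a merge, one otherwise
def mdB_merge : List Int → List Int
  | [] => []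
  | [a] => [a]
  | a :: b :: rest => if a = b then a * 2 :: mdB_merge rest else a :: mdB_merge (b :: rest)

-- for j, v in enumerate(merged): out[n-1-j][i] = v
def mdB_write (out : List (List Int)) (n i : Int) (merged : List Int) : List (List Int) :=
  (PySem.List.enumerate merged 0).foldl (fun b p =>
    PySem.List.pySetD b (n - 1 - p.1)
      (PySem.List.pySetD (PySem.List.pyGetD b (n - 1 - p.1) []) i p.2)) out

def merge_down_alt (board : List (List Int)) (n : Int) : List (List Int) :=
  (PySem.List.pyRange 0 n 1).foldl
    (fun out i => mdB_write out n i (mdB_merge (mdB_col board n i)))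
    (List.replicate n.toNat (List.replicate n.toNat 0))

-- ===== PRECONDITION & SPEC =====
-- Pre_ excludes exactly the inputs where A raises IndexError: some accessed row (first n rows,
-- columns 0..n-1) is missing or too short.  n ≤ 0 (empty range, A returns []) is inside Pre_.
def Pre_merge_down (board : List (List Int)) (n : Int) : Prop :=
  n ≤ (board.length : Int) ∧ ∀ row ∈ board.take n.toNat, n ≤ (row.length : Int)
instance (board : List (List Int)) (n : Int) : Decidable (Pre_merge_down board n) := by
  unfold Pre_merge_down; infer_instance

def pvWitness_merge_down : List (List Int) × Int := ([[2, 0], [2, 4]], 2)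

def Spec_merge_down (board : List (List Int)) (n : Int) (out : List (List Int)) : Prop := out = merge_down_alt board n
instance (board : List (List Int)) (n : Int) (out : List (List Int)) : Decidable (Spec_merge_down board n out) := by unfold Spec_merge_down; infer_instance

-- ===== CLAIM (what is proved, stated in full; the proofs are below) =====
def Claim_equal_merge_down : Prop := ∀ (board : List (List Int)) (n : Int), Dom_merge_down board n → Pre_merge_down board n → Spec_merge_down board n (merge_down board n)

-- ===== LEMMAS AND PROOFS =====

lemma pyGetD_app0 (pre ys : List Int) (y : Int) :
    PySem.List.pyGetD (pre ++ y :: ys) (pre.length : Int) 0 = y := by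
  simp [List.getD_eq_getElem?_getD]

lemma pyGetD_app1 (pre ys : List Int) (y z : Int) :
    PySem.List.pyGetD (pre ++ y :: z :: ys) ((pre.length : Int) + 1) 0 = z := by
  have h : ((pre.length : Int) + 1) = ((pre.length + 1 : Nat) : Int) := by push_cast; ring
  rw [h, PySem.List.pyGetD_natCast]
  simp [List.getD_eq_getElem?_getD]

lemma mergeLoop_eq (post : List Int) : ∀ (pre : List Int) (n : Int),
    (pre.length : Int) + post.length ≤ n →
    mdA_mergeLoop (PySem.List.pyRange pre.length n 1) (pre ++ post) = pre ++ mdB_merge post := by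
  induction post using mdB_merge.induct with
  | case1 =>
    intro pre n hn
    simp only [mdB_merge, List.append_nil]
    by_cases hlt : (pre.length : Int) < n
    · rw [PySem.List.pyRange_one_cons hlt]
      simp only [mdA_mergeLoop]
      rw [if_pos (by omega)]
    · rw [PySem.List.pyRange_one_eq_nil (by omega)]
      rfl
  | case2 a =>
    intro pre n hn
    simp only [mdB_merge]
    have hlt : (pre.length : Int) < n := by simp at hn; omega
    rw [PySem.List.pyRange_one_cons hlt]
    simp only [mdA_mergeLoop]
    rw [if_pos (by simp; omega)]
  | case3 b rest ih =>
    intro pre n hn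
    have hlt : (pre.length : Int) < n := by simp at hn ⊢; omega
    rw [PySem.List.pyRange_one_cons hlt]
    simp only [mdA_mergeLoop]
    rw [if_neg (by simp; omega)]
    rw [pyGetD_app0, pyGetD_app1, if_pos rfl]
    have hidx : ((pre.length : Int) + 1) = ((pre.length + 1 : Nat) : Int) := by push_cast; ring
    rw [PySem.List.pySetD_natCast]
    have hset : (pre ++ b :: b :: rest).set pre.length (b + b) = pre ++ (b + b) :: b :: rest := by
      simp
    rw [hset, hidx, PySem.List.pop?_natCast _ _ (by simp)]
    simp only [Option.map_some, Option.getD_some]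
    have herase : (pre ++ (b + b) :: b :: rest).eraseIdx (pre.length + 1) = pre ++ (b + b) :: rest := by
      rw [List.eraseIdx_append_of_length_le (by omega)]
      simp
    rw [herase]
    have hpre' : pre ++ (b + b) :: rest = (pre ++ [b + b]) ++ rest := by simp
    have h2 : ((pre.length + 1 : Nat) : Int) = (((pre ++ [b + b]).length : Nat) : Int) := by simp
    rw [hpre', h2, ih _ n (by simp at hn ⊢; omega)]
    simp only [mdB_merge]
    simp [mul_two]
  | case4 a b rest hab ih =>
    intro pre n hn
    have hlt : (pre.length : Int) < n := by simp at hn; omega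
    rw [PySem.List.pyRange_one_cons hlt]
    simp only [mdA_mergeLoop]
    rw [if_neg (by simp; omega)]
    rw [pyGetD_app0, pyGetD_app1, if_neg hab]
    have hidx : ((pre.length : Int) + 1) = ((pre.length + 1 : Nat) : Int) := by push_cast; ring
    have hpre' : pre ++ a :: b :: rest = (pre ++ [a]) ++ (b :: rest) := by simp
    have h2 : ((pre.length + 1 : Nat) : Int) = (((pre ++ [a]).length : Nat) : Int) := by simp
    rw [hidx, hpre', h2, ih _ n (by simp at hn ⊢; omega)]
    simp only [mdB_merge, if_neg hab]
    simp

-- pre = [] instance of mergeLoop_eq: A's del-based merge pass equals B's pairing merge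
lemma mergeLoop_zero (t : List Int) (n : Int) (h : (t.length : Int) ≤ n) :
    mdA_mergeLoop (PySem.List.pyRange 0 n 1) t = mdB_merge t := by
  have := mergeLoop_eq t [] n (by simpa using h)
  simpa using this

-- A's gather pass for column i equals B's slice/reverse/filter column
lemma gather_eq (board : List (List Int)) (n i : Int) (hn : 0 ≤ n)
    (hlen : n ≤ (board.length : Int)) : mdA_gather board n i = mdB_col board n i := by
  unfold mdA_gather mdB_col
  rw [PySem.List.foldl_append_ite
        (p := fun j => PySem.List.pyGetD (PySem.List.pyGetD board (n - 1 - j) []) i 0 ≠ 0)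
        (f := fun j => PySem.List.pyGetD (PySem.List.pyGetD board (n - 1 - j) []) i 0)]
  rw [show (fun x => decide (PySem.List.pyGetD (PySem.List.pyGetD board (n - 1 - x) []) i 0 ≠ 0))
        = ((fun x : Int => decide ¬ x = 0) ∘ (fun j => PySem.List.pyGetD (PySem.List.pyGetD board (n - 1 - j) []) i 0)) from rfl]
  rw [← List.filter_map]
  rw [PySem.List.slice_to _ hn]
  have hpred : (fun x : Int => x != 0) = (fun x : Int => decide ¬ x = 0) := by
    funext x; by_cases hx : x = 0 <;> simp [hx]
  rw [hpred, List.nil_append]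
  congr 1
  -- the j-indexed gather list is the reversed column
  apply List.ext_getElem
  · simp [PySem.List.length_pyRange_one]
    omega
  · intro k h1 h2
    have hk : k < n.toNat := by simpa [PySem.List.length_pyRange_one] using h1
    have hmin : (List.take n.toNat board).length = n.toNat := by simp; omega
    simp only [List.getElem_map, PySem.List.getElem_pyRange_one, List.getElem_reverse,
               List.length_map, hmin, List.getElem_take]
    have hidx : n - 1 - (0 + (k : Int)) = ((n.toNat - 1 - k : Nat) : Int) := by omega
    rw [hidx, PySem.List.pyGetD_natCast]
    congr 1
    rw [List.getD_eq_getElem?_getD, List.getElem?_eq_getElem (by omega)]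
    rfl

-- the column of gathered values is at most n long
lemma col_len_le (board : List (List Int)) (n i : Int) (hn : 0 ≤ n) :
    ((mdB_col board n i).length : Int) ≤ n := by
  unfold mdB_col
  rw [PySem.List.slice_to _ hn]
  have h := List.length_filter_le (fun x : Int => x != 0)
      ((List.map (fun row => PySem.List.pyGetD row i 0) (List.take n.toNat board)).reverse)
  simp only [List.length_reverse, List.length_map, List.length_take] at h
  have : (List.take n.toNat board).length ≤ n.toNat := by simp
  omega

-- A's write-back loop over range(len(t)) equals B's enumerate write-back
lemma write_eq (b : List (List Int)) (n i : Int) (t : List Int) :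
    mdA_write b n i t = mdB_write b n i t := by
  unfold mdA_write mdB_write
  rw [PySem.List.enumerate_eq_map_pyRange t 0, List.foldl_map]

-- ===== VERDICT (by name: the statement is the Claim_ definition above) =====
theorem merge_down_spec : Claim_equal_merge_down := by
  intro board n _dom hpre
  unfold Spec_merge_down merge_down merge_down_alt
  simp only [List.map_map]
  apply PySem.List.foldl_congr_mem
  intro acc i hi
  rw [PySem.List.mem_pyRange_one] at hi
  obtain ⟨hi0, hin⟩ := hi
  have hn : 0 ≤ n := le_trans hi0 (le_of_lt hin)
  rw [PySem.List.pyGetD_map_pyRange_of_nonneg _ _ _ _ hi0 hin]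
  rw [write_eq, Function.comp_apply, gather_eq board n i hn hpre.1,
      mergeLoop_zero _ _ (col_len_le board n i hn)]
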